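-- pv_equiv track=rewrite | github.com/nailtonsp/previsao_esportiva | script2.py | definir_classificados_32
-- ===== SOURCE A (Python) =====
-- def definir_classificados_32(resultados_grupos, forca_dict):
--     primeiros = [(t, s[0], s[1], s[2], s[3]) for t, g, p, *s in resultados_grupos if p == 1]
--     segundos = [(t, s[0], s[1], s[2], s[3]) for t, g, p, *s in resultados_grupos if p == 2]
--     terceiros = sorted(
--         [(t, s[0], s[1], s[2], s[3]) for t, g, p, *s in resultados_grupos if p == 3],
--         key = lambda x: (x[1], x[2], x[3], x[4]), reverse = True
--     )[:8]
--
--     todos = primeiros + segundos + terceiros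
--     return sorted(todos, key = lambda x: (x[1], x[2], x[3], forca_dict[x[0]]), reverse = True)
-- ===== SOURCE B (Python) =====
-- def definir_classificados_32(resultados_grupos, forca_dict):
--     # single pass: three buckets, with a bounded (size <= 8) stable descending
--     # insertion for the third-placed teams instead of sorting them all
--     primeiros = []
--     segundos = []
--     top3 = []
--     for t, g, p, a, b, c, d in resultados_grupos:
--         row = (t, a, b, c, d)
--         if p == 1:
--             primeiros.append(row)
--         elif p == 2:
--             segundos.append(row)
--         elif p == 3:
--             i = 0
--             while i < len(top3) and row[1:] <= top3[i][1:]: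
--                 i += 1
--             top3.insert(i, row)
--             del top3[8:]
--     todos = primeiros + segundos + top3
--     return sorted(todos, key=lambda x: (x[1], x[2], x[3], forca_dict[x[0]]), reverse=True)
-- ===== Notes on version B (the rewrite author's own statement) =====
-- stated objective: alternative
-- what changed: A's three filtering comprehensions plus a full sort-and-slice of the third-placed teams are replaced by a single pass over resultados_grupos that keeps three accumulators and maintains the top-8 third-placed teams with a bounded stable descending insertion; the final stable sort is unchanged.
import Mathlib
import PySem

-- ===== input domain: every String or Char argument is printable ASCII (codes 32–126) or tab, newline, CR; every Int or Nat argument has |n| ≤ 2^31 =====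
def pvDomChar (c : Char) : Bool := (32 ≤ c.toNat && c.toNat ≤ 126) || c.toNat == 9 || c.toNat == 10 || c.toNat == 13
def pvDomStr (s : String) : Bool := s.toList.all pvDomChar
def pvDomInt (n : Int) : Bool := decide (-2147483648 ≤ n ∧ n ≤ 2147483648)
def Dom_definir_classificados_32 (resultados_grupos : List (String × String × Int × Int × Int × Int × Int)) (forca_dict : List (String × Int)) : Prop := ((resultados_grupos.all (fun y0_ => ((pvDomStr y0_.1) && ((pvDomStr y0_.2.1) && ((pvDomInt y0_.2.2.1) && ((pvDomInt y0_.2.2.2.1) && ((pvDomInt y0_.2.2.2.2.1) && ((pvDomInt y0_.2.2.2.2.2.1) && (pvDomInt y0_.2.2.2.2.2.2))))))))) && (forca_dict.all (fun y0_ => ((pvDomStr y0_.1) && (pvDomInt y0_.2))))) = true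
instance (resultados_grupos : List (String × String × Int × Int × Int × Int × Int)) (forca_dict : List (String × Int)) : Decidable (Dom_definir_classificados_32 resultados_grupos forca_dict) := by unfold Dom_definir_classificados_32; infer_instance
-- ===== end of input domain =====

-- B replaces A's three comprehension passes and full sort of the third-placed teams by a
-- single pass with three accumulators and a bounded (size ≤ 8) stable descending insertion;
-- objective: alternative (same results, different data traversal; not claimed faster).

-- ===== PORT A =====
-- shared helpers: the tuple projection (t, s[0], s[1], s[2], s[3]) and the two sort keys.
-- Python's 4-tuple-of-int comparison is ported as lexicographic comparison of 4-element
-- `List Int` (exact for equal-length int tuples).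
def pvProj (r : String × String × Int × Int × Int × Int × Int) : String × Int × Int × Int × Int :=
  (r.1, r.2.2.2.1, r.2.2.2.2.1, r.2.2.2.2.2.1, r.2.2.2.2.2.2)

def pvKey4 (x : String × Int × Int × Int × Int) : List Int :=
  [x.2.1, x.2.2.1, x.2.2.2.1, x.2.2.2.2]

-- key (x[1], x[2], x[3], forca_dict[x[0]]); Pre_ guarantees the dict lookup succeeds,
-- so getD's default 0 is never used on admitted inputs.
def pvKeyF (forca_dict : List (String × Int)) (x : String × Int × Int × Int × Int) : List Int :=
  [x.2.1, x.2.2.1, x.2.2.2.1, PySem.Dict.getD ⟨forca_dict⟩ x.1 0]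

def definir_classificados_32 (resultados_grupos : List (String × String × Int × Int × Int × Int × Int)) (forca_dict : List (String × Int)) : List (String × Int × Int × Int × Int) :=
  let primeiros := (resultados_grupos.filter (fun r => r.2.2.1 == 1)).map pvProj
  let segundos := (resultados_grupos.filter (fun r => r.2.2.1 == 2)).map pvProj
  -- [:8] with a nonnegative literal bound is List.take 8
  let terceiros := (PySem.List.sorted ((resultados_grupos.filter (fun r => r.2.2.1 == 3)).map pvProj) pvKey4 true).take 8
  let todos := primeiros ++ segundos ++ terceiros
  PySem.List.sorted todos (pvKeyF forca_dict) true

-- ===== PORT B =====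
-- the while-loop insertion of Source B: walk past entries whose key is ≥ row's key, insert there
def pvInsDesc (row : String × Int × Int × Int × Int) (l : List (String × Int × Int × Int × Int)) : List (String × Int × Int × Int × Int) :=
  match l with
  | [] => [row]
  | y :: ys => if pvKey4 row ≤ pvKey4 y then y :: pvInsDesc row ys else row :: y :: ys

def pvStep (st : List (String × Int × Int × Int × Int) × List (String × Int × Int × Int × Int) × List (String × Int × Int × Int × Int)) (r : String × String × Int × Int × Int × Int × Int) : List (String × Int × Int × Int × Int) × List (String × Int × Int × Int × Int) × List (String × Int × Int × Int × Int) :=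
  let row := pvProj r
  if r.2.2.1 == 1 then (st.1 ++ [row], st.2.1, st.2.2)
  else if r.2.2.1 == 2 then (st.1, st.2.1 ++ [row], st.2.2)
  else if r.2.2.1 == 3 then (st.1, st.2.1, (pvInsDesc row st.2.2).take 8)  -- del top3[8:]
  else st

def definir_classificados_32_alt (resultados_grupos : List (String × String × Int × Int × Int × Int × Int)) (forca_dict : List (String × Int)) : List (String × Int × Int × Int × Int) :=
  let st := resultados_grupos.foldl pvStep ([], [], [])
  PySem.List.sorted (st.1 ++ st.2.1 ++ st.2.2) (pvKeyF forca_dict) true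

-- ===== PRECONDITION & SPEC =====
-- Pre_ excludes exactly the inputs where Python A raises KeyError: some team placed 1st,
-- 2nd or 3rd in its group is missing from forca_dict.
def Pre_definir_classificados_32 (resultados_grupos : List (String × String × Int × Int × Int × Int × Int)) (forca_dict : List (String × Int)) : Prop :=
  ∀ r ∈ resultados_grupos, (r.2.2.1 = 1 ∨ r.2.2.1 = 2 ∨ r.2.2.1 = 3) → r.1 ∈ forca_dict.map Prod.fst

instance (resultados_grupos : List (String × String × Int × Int × Int × Int × Int)) (forca_dict : List (String × Int)) : Decidable (Pre_definir_classificados_32 resultados_grupos forca_dict) := by unfold Pre_definir_classificados_32; infer_instance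

def pvWitness_definir_classificados_32 : (List (String × String × Int × Int × Int × Int × Int)) × (List (String × Int)) :=
  ([("x", "A", 1, 9, 5, 3, 1), ("y", "A", 2, 6, 4, 2, 0), ("z", "A", 3, 4, 1, 1, 2), ("w", "A", 4, 0, 0, 0, 0)],
   [("x", 80), ("y", 70), ("z", 60)])

def Spec_definir_classificados_32 (resultados_grupos : List (String × String × Int × Int × Int × Int × Int)) (forca_dict : List (String × Int)) (out : List (String × Int × Int × Int × Int)) : Prop := out = definir_classificados_32_alt resultados_grupos forca_dict
instance (resultados_grupos : List (String × String × Int × Int × Int × Int × Int)) (forca_dict : List (String × Int)) (out : List (String × Int × Int × Int × Int)) : Decidable (Spec_definir_classificados_32 resultados_grupos forca_dict out) := by unfold Spec_definir_classificados_32; infer_instance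

-- ===== CLAIM (what is proved, stated in full; the proofs are below) =====
def Claim_equal_definir_classificados_32 : Prop := ∀ (resultados_grupos : List (String × String × Int × Int × Int × Int × Int)) (forca_dict : List (String × Int)), Dom_definir_classificados_32 resultados_grupos forca_dict → Pre_definir_classificados_32 resultados_grupos forca_dict → Spec_definir_classificados_32 resultados_grupos forca_dict (definir_classificados_32 resultados_grupos forca_dict)

-- ===== LEMMAS AND PROOFS =====

-- Source B's while-loop insertion is the stable descending-order insertion of insertBy
theorem pvInsDesc_eq_insertBy (row : String × Int × Int × Int × Int) (l : List (String × Int × Int × Int × Int)) :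
    pvInsDesc row l = PySem.List.insertBy (fun a b => decide (pvKey4 b < pvKey4 a)) row l := by
  induction l with
  | nil => rfl
  | cons y ys ih =>
    simp only [pvInsDesc, PySem.List.insertBy, ih]
    by_cases h : pvKey4 row ≤ pvKey4 y
    · simp [h, not_lt.mpr h]
    · simp [h, lt_of_not_ge h]

-- truncating to the first k elements before inserting does not change the first k elements
theorem take_insertBy_take (b : (String × Int × Int × Int × Int) → (String × Int × Int × Int × Int) → Bool)
    (x : String × Int × Int × Int × Int) (l : List (String × Int × Int × Int × Int)) (k : Nat) :
    (PySem.List.insertBy b x (l.take k)).take k = (PySem.List.insertBy b x l).take k := by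
  induction l generalizing k with
  | nil => simp
  | cons y ys ih =>
    cases k with
    | zero => simp
    | succ k =>
      simp only [List.take_succ_cons, PySem.List.insertBy]
      by_cases h : b x y
      · simp only [h, if_true, List.take_succ_cons]
        congr 1
        cases k with
        | zero => simp
        | succ m => simp [List.take_succ_cons, List.take_take]
      · simp [h, List.take_succ_cons, ih]

-- the bounded-insertion fold computes the first k elements of the full insertion-sort fold
theorem foldl_insTake (b : (String × Int × Int × Int × Int) → (String × Int × Int × Int × Int) → Bool)
    (l : List (String × Int × Int × Int × Int)) (k : Nat) (acc : List (String × Int × Int × Int × Int)) :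
    l.foldl (fun acc x => (PySem.List.insertBy b x acc).take k) (acc.take k)
      = (l.foldl (fun acc x => PySem.List.insertBy b x acc) acc).take k := by
  induction l generalizing acc with
  | nil => rfl
  | cons x xs ih =>
    simp only [List.foldl_cons]
    rw [take_insertBy_take]
    exact ih _

-- B's single pass equals A's three filtered passes (with the bounded insertion on bucket 3)
theorem pvStep_foldl (rg : List (String × String × Int × Int × Int × Int × Int))
    (p s t : List (String × Int × Int × Int × Int)) :
    rg.foldl pvStep (p, s, t)
      = (p ++ (rg.filter (fun r => r.2.2.1 == 1)).map pvProj,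
         s ++ (rg.filter (fun r => r.2.2.1 == 2)).map pvProj,
         ((rg.filter (fun r => r.2.2.1 == 3)).map pvProj).foldl
           (fun acc x => (pvInsDesc x acc).take 8) t) := by
  induction rg generalizing p s t with
  | nil => simp
  | cons r rs ih =>
    simp only [List.foldl_cons, pvStep, List.filter_cons]
    by_cases h1 : r.2.2.1 = 1
    · simp [h1, ih]
    · by_cases h2 : r.2.2.1 = 2
      · simp [h1, h2, ih]
      · by_cases h3 : r.2.2.1 = 3
        · simp [h1, h2, h3, ih]
        · simp [h1, h2, h3, ih]

-- ===== VERDICT (by name: the statement is the Claim_ definition above) =====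
theorem definir_classificados_32_spec : Claim_equal_definir_classificados_32 := by
  intro rg fd _ _
  unfold Spec_definir_classificados_32 definir_classificados_32 definir_classificados_32_alt
  rw [pvStep_foldl]
  have hins : ∀ (l : List (String × Int × Int × Int × Int)),
      l.foldl (fun acc x => (pvInsDesc x acc).take 8) ([] : List (String × Int × Int × Int × Int))
        = (PySem.List.sorted l pvKey4 true).take 8 := by
    intro l
    simp only [pvInsDesc_eq_insertBy]
    rw [PySem.List.sorted_rev_eq_foldl_insertBy]
    have := foldl_insTake (fun a b => decide (pvKey4 b < pvKey4 a)) l 8 []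
    simpa using this
  simp [hins]
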